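-- pv_equiv track=rewrite | github.com/aetandrianwr/next_loc_clean_v2 | scripts/experiment_V1/exp7_recency/run_experiment.py | categorize_by_target_recency
-- ===== SOURCE A (Python) =====
-- from collections import defaultdict, Counter
--
-- def categorize_by_target_recency(test_data, recency_info):
--     """Group samples by recency of target in history."""
--     groups = defaultdict(list)
--
--     recency_bins = [
--         ('Target: Same Day (0)', 0, 1),
--         ('Target: 1 Day Ago', 1, 2),
--         ('Target: 2-3 Days Ago', 2, 4),
--         ('Target: 4-7 Days Ago', 4, 8),
--         ('Target: > 7 Days Ago', 8, 100),
--         ('Target: Not in History', -1, 0),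
--     ]
--
--     for info in recency_info:
--         target_diff = info['target_most_recent_diff']
--
--         for bin_name, low, high in recency_bins:
--             if low <= target_diff < high:
--                 groups[bin_name].append(info['idx'])
--                 break
--
--     return groups, recency_bins
-- ===== SOURCE B (Python) =====
-- from collections import defaultdict
--
-- _RECENCY_BINS = [
--     ('Target: Same Day (0)', 0, 1),
--     ('Target: 1 Day Ago', 1, 2),
--     ('Target: 2-3 Days Ago', 2, 4),
--     ('Target: 4-7 Days Ago', 4, 8),
--     ('Target: > 7 Days Ago', 8, 100),
--     ('Target: Not in History', -1, 0),
-- ]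
--
--
-- def _bin_name(d):
--     """Closed-form classification of a recency difference (no table scan)."""
--     if d == 0:
--         return 'Target: Same Day (0)'
--     if d == 1:
--         return 'Target: 1 Day Ago'
--     if 2 <= d < 4:
--         return 'Target: 2-3 Days Ago'
--     if 4 <= d < 8:
--         return 'Target: 4-7 Days Ago'
--     if 8 <= d < 100:
--         return 'Target: > 7 Days Ago'
--     if d == -1:
--         return 'Target: Not in History'
--     return None
--
--
-- def categorize_by_target_recency(test_data, recency_info):
--     """Group samples by recency of target in history (staged: classify, then group)."""
--     # Stage 1: classify every sample into a flat (bin_name, idx) stream.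
--     pairs = []
--     for info in recency_info:
--         name = _bin_name(info['target_most_recent_diff'])
--         if name is not None:
--             pairs.append((name, info['idx']))
--     # Stage 2: group the classified stream.
--     groups = defaultdict(list)
--     for name, idx in pairs:
--         groups[name].append(idx)
--     return groups, _RECENCY_BINS
-- ===== Notes on version B (the rewrite author's own statement) =====
-- stated objective: alternative
-- what changed: A makes one pass that scans the bins table per sample (with break) while building the dict; B is staged: a first pass classifies each sample with a closed-form if-chain into a flat (bin_name, idx) list, a second pass groups that list into the dict.
import Mathlib
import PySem

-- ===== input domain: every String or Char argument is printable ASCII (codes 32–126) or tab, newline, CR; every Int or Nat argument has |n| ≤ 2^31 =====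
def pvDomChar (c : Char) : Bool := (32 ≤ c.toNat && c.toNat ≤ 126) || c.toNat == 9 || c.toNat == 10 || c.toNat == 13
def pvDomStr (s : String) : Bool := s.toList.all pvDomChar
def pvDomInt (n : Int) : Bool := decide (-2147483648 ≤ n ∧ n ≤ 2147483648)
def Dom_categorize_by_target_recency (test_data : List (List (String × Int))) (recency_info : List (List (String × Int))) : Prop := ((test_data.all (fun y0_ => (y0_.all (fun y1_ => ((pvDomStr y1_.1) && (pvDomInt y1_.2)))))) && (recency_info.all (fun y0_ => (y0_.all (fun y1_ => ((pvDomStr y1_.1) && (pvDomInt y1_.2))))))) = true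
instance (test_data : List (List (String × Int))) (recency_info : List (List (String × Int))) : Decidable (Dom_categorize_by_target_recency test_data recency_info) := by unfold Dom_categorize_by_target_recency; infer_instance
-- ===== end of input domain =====

-- B replaces A's single pass (per-sample scan of the bins table with break, dict built inline)
-- by two staged passes: a closed-form classifier producing a flat (bin, idx) list, then a
-- grouping pass over that list (alternative decomposition; same return value).


-- ===== PORT A =====
-- the literal recency_bins table of A (also returned by both functions)
def pvBins : List (String × Int × Int) :=
  [("Target: Same Day (0)", 0, 1),
   ("Target: 1 Day Ago", 1, 2),
   ("Target: 2-3 Days Ago", 2, 4),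
   ("Target: 4-7 Days Ago", 4, 8),
   ("Target: > 7 Days Ago", 8, 100),
   ("Target: Not in History", -1, 0)]

-- A's inner 'for bin_name, low, high in recency_bins: if low <= d < high: …; break'
def pvFirstBin : List (String × Int × Int) → Int → Option String
  | [], _ => none
  | (name, lohi) :: rest, d =>
      if lohi.1 ≤ d ∧ d < lohi.2 then some name else pvFirstBin rest d

-- body of A's outer loop; get? = none is Python's KeyError (excluded by Pre_)
def pvStepA (groups : PySem.Dict String (List Int)) (info : List (String × Int)) :
    PySem.Dict String (List Int) :=
  match (PySem.Dict.mk info).get? "target_most_recent_diff" with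
  | none => groups
  | some d =>
    match pvFirstBin pvBins d with
    | none => groups
    | some name =>
      match (PySem.Dict.mk info).get? "idx" with
      | none => groups
      | some idx => groups.modify name [] (· ++ [idx])   -- defaultdict(list): groups[name].append(idx)

def categorize_by_target_recency (test_data : List (List (String × Int))) (recency_info : List (List (String × Int))) : (List (String × List Int)) × (List (String × Int × Int)) :=
  ((recency_info.foldl pvStepA PySem.Dict.empty).items, pvBins)

-- ===== PORT B =====
-- B's _bin_name: direct closed-form classifier, no scan of the bins table
def pvBinName (d : Int) : Option String :=
  if d = 0 then some "Target: Same Day (0)"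
  else if d = 1 then some "Target: 1 Day Ago"
  else if 2 ≤ d ∧ d < 4 then some "Target: 2-3 Days Ago"
  else if 4 ≤ d ∧ d < 8 then some "Target: 4-7 Days Ago"
  else if 8 ≤ d ∧ d < 100 then some "Target: > 7 Days Ago"
  else if d = -1 then some "Target: Not in History"
  else none

-- B stage 1: classify one sample into (bin_name, idx), or drop it.
-- none also covers a missing key, where Python raises KeyError (excluded by Pre_).
def pvClassify (info : List (String × Int)) : Option (String × Int) :=
  match (PySem.Dict.mk info).get? "target_most_recent_diff", (PySem.Dict.mk info).get? "idx" with
  | some d, some idx => (pvBinName d).map (fun name => (name, idx))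
  | _, _ => none

-- B stage 2: group the classified (name, idx) stream into a defaultdict(list).
def pvGroup (pairs : List (String × Int)) : PySem.Dict String (List Int) :=
  pairs.foldl (fun g p => g.modify p.1 [] (· ++ [p.2])) PySem.Dict.empty

def categorize_by_target_recency_alt (test_data : List (List (String × Int))) (recency_info : List (List (String × Int))) : (List (String × List Int)) × (List (String × Int × Int)) :=
  ((pvGroup (recency_info.filterMap pvClassify)).items, pvBins)

-- ===== PRECONDITION & SPEC =====
-- Pre_ excludes exactly the inputs where Python A raises KeyError: a sample without the
-- 'target_most_recent_diff' key, or one whose diff falls in a bin but lacks the 'idx' key.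
def Pre_categorize_by_target_recency (test_data : List (List (String × Int))) (recency_info : List (List (String × Int))) : Prop :=
  recency_info.all (fun info =>
    match (PySem.Dict.mk info).get? "target_most_recent_diff" with
    | none => false
    | some d => !(decide (-1 ≤ d ∧ d < 100)) || (PySem.Dict.mk info).contains "idx") = true
instance (test_data : List (List (String × Int))) (recency_info : List (List (String × Int))) : Decidable (Pre_categorize_by_target_recency test_data recency_info) := by unfold Pre_categorize_by_target_recency; infer_instance

def pvWitness_categorize_by_target_recency : (List (List (String × Int))) × (List (List (String × Int))) :=
  ([], [[("target_most_recent_diff", 2), ("idx", 0)], [("target_most_recent_diff", 150)]])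

def Spec_categorize_by_target_recency (test_data : List (List (String × Int))) (recency_info : List (List (String × Int))) (out : (List (String × List Int)) × (List (String × Int × Int))) : Prop := out = categorize_by_target_recency_alt test_data recency_info
instance (test_data : List (List (String × Int))) (recency_info : List (List (String × Int))) (out : (List (String × List Int)) × (List (String × Int × Int))) : Decidable (Spec_categorize_by_target_recency test_data recency_info out) := by unfold Spec_categorize_by_target_recency; infer_instance

-- ===== CLAIM (what is proved, stated in full; the proofs are below) =====
def Claim_equal_categorize_by_target_recency : Prop := ∀ (test_data : List (List (String × Int))) (recency_info : List (List (String × Int))), Dom_categorize_by_target_recency test_data recency_info → Pre_categorize_by_target_recency test_data recency_info → Spec_categorize_by_target_recency test_data recency_info (categorize_by_target_recency test_data recency_info)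

-- ===== LEMMAS AND PROOFS =====
-- A's first-match scan of the literal bins table computes B's closed-form classifier.
lemma firstBin_eq_binName (d : Int) : pvFirstBin pvBins d = pvBinName d := by
  simp only [pvBins, pvFirstBin, pvBinName]
  split_ifs <;> first | rfl | omega

-- On inputs admitted by Pre_, A's loop body is exactly B's classify-then-group step.
lemma stepA_eq_classify (g : PySem.Dict String (List Int)) (info : List (String × Int))
    (h : (match (PySem.Dict.mk info).get? "target_most_recent_diff" with
          | none => false
          | some d => !(decide (-1 ≤ d ∧ d < 100)) || (PySem.Dict.mk info).contains "idx") = true) :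
    pvStepA g info =
      match pvClassify info with
      | none => g
      | some p => g.modify p.1 [] (· ++ [p.2]) := by
  unfold pvStepA pvClassify
  cases hd : (PySem.Dict.mk info).get? "target_most_recent_diff" with
  | none => simp [hd] at h
  | some d =>
    simp only [firstBin_eq_binName]
    cases hi : (PySem.Dict.mk info).get? "idx" with
    | some idx => cases hn : pvBinName d <;> simp [hn]
    | none =>
      simp only [hd] at h
      have hc : (PySem.Dict.mk info).contains "idx" = false := by
        have := (PySem.Dict.get?_eq_none_iff_contains (PySem.Dict.mk info) "idx").mp hi
        simpa using this
      have hrange : ¬ (-1 ≤ d ∧ d < 100) := by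
        by_contra hr
        simp [hr, hc] at h
      have hn : pvBinName d = none := by
        unfold pvBinName; split_ifs <;> first | rfl | exact absurd (by omega) hrange
      simp [hn]

-- Folding A's step over the list equals grouping the classified stream.
lemma foldl_stepA_eq (ri : List (List (String × Int))) (g : PySem.Dict String (List Int))
    (h : ri.all (fun info =>
      match (PySem.Dict.mk info).get? "target_most_recent_diff" with
      | none => false
      | some d => !(decide (-1 ≤ d ∧ d < 100)) || (PySem.Dict.mk info).contains "idx") = true) :
    ri.foldl pvStepA g =
      (ri.filterMap pvClassify).foldl (fun g p => g.modify p.1 [] (· ++ [p.2])) g := by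
  induction ri generalizing g with
  | nil => rfl
  | cons info rest ih =>
    simp only [List.all_cons, Bool.and_eq_true] at h
    simp only [List.foldl_cons, List.filterMap_cons]
    rw [stepA_eq_classify g info h.1]
    cases hc : pvClassify info with
    | none => exact ih _ h.2
    | some p => simp only [List.foldl_cons]; exact ih _ h.2

-- ===== VERDICT (by name: the statement is the Claim_ definition above) =====
theorem categorize_by_target_recency_spec : Claim_equal_categorize_by_target_recency := by
  intro test_data recency_info _ hpre
  unfold Spec_categorize_by_target_recency categorize_by_target_recency categorize_by_target_recency_alt pvGroup
  rw [foldl_stepA_eq recency_info PySem.Dict.empty hpre]
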